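-- pv_equiv track=rewrite | github.com/prabhat24/dynamic_programming | dp_2D/untitled.py | max_price
-- ===== SOURCE A (Python) =====
-- def max_price(arr, i, j):
--
-- 	if i>j:
-- 		return 0
--
-- 	maxa = 0
-- 	for k in range(i, j+1):
-- 		if k == i and k == j:
-- 			inc = arr[k]
-- 		elif k == i and i+1 <= j:
-- 			inc = arr[k] + arr[k + 1]
-- 		elif k == j and k-1 >= i:
-- 			inc = arr[k] + arr[k-1]
-- 		elif k > i and k < j:
-- 			inc = arr[k-1] + arr[k] + arr[k+1]
-- 		each_ans = max_price(arr, i, k-1) + max_price(arr, k+1, j) + inc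
-- 		maxa = max(maxa, each_ans)
-- 	return maxa
-- ===== SOURCE B (Python) =====
-- def max_price(arr, i, j):
--     if i > j:
--         return 0
--     dp = {}
--     for length in range(1, j - i + 2):
--         for l in range(i, j - length + 2):
--             r = l + length - 1
--             best = 0
--             for k in range(l, r + 1):
--                 inc = arr[k]
--                 if k > l:
--                     inc += arr[k - 1]
--                 if k < r:
--                     inc += arr[k + 1]
--                 cand = dp.get((l, k - 1), 0) + dp.get((k + 1, r), 0) + inc
--                 if cand > best:
--                     best = cand
--             dp[(l, r)] = best
--     return dp[(i, j)]
-- ===== Notes on version B (the rewrite author's own statement) =====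
-- stated objective: faster
-- what changed: Replaced the exponential top-down interval recursion by a bottom-up interval DP that fills a (l,r)-keyed table by increasing interval length, computing each neighbour-sum contribution additively instead of via the four-way branch chain.
import Mathlib
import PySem

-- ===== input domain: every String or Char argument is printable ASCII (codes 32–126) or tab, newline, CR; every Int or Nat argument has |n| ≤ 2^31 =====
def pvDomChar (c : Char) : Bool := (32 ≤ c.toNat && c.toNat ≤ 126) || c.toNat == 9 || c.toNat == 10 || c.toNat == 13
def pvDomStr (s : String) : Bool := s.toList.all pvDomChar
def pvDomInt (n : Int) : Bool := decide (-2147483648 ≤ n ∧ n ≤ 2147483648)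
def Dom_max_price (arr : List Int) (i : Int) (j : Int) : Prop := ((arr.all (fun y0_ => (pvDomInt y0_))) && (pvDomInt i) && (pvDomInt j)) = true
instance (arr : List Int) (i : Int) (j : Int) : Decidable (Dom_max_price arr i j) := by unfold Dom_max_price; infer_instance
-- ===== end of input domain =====

-- B replaces A's exponential top-down interval recursion by a bottom-up O(n^3) interval DP table.

-- ===== PORT A =====
-- Literal transliteration of A: arr[k] is pyGetD (exact under Pre_, which keeps every
-- accessed index in Python range); the final 'else 0' is unreachable for i ≤ k ≤ j
-- (in Python 'inc' is always assigned there).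
def max_price (arr : List Int) (i : Int) (j : Int) : Int :=
  if i > j then 0
  else
    (PySem.List.pyRange i (j + 1) 1).attach.foldl (fun maxa kk =>
      let k := kk.1
      let inc : Int :=
        if k = i ∧ k = j then PySem.List.pyGetD arr k 0
        else if k = i ∧ i + 1 ≤ j then PySem.List.pyGetD arr k 0 + PySem.List.pyGetD arr (k + 1) 0
        else if k = j ∧ k - 1 ≥ i then PySem.List.pyGetD arr k 0 + PySem.List.pyGetD arr (k - 1) 0
        else if k > i ∧ k < j then PySem.List.pyGetD arr (k - 1) 0 + PySem.List.pyGetD arr k 0 + PySem.List.pyGetD arr (k + 1) 0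
        else 0
      let each_ans := max_price arr i (k - 1) + max_price arr (k + 1) j + inc
      max maxa each_ans) 0
termination_by (j - i + 1).toNat
decreasing_by
  all_goals
    have hm := PySem.List.mem_pyRange_one.mp kk.2
    omega

-- ===== PORT B =====
-- B-side helpers: the inner 'for k' loop and the 'for l' row of Source B.
def altBest (arr : List Int) (dp : PySem.Dict (Int × Int) Int) (l : Int) (r : Int) : Int :=
  (PySem.List.pyRange l (r + 1) 1).foldl (fun best k =>
    let inc : Int := PySem.List.pyGetD arr k 0
      + (if k > l then PySem.List.pyGetD arr (k - 1) 0 else 0)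
      + (if k < r then PySem.List.pyGetD arr (k + 1) 0 else 0)
    let cand := dp.getD (l, k - 1) 0 + dp.getD (k + 1, r) 0 + inc
    if cand > best then cand else best) 0

def altRow (arr : List Int) (i : Int) (j : Int) (dp : PySem.Dict (Int × Int) Int) (length : Int) :
    PySem.Dict (Int × Int) Int :=
  (PySem.List.pyRange i (j - length + 2) 1).foldl (fun dp l =>
    dp.insert (l, l + length - 1) (altBest arr dp l (l + length - 1))) dp

def max_price_alt (arr : List Int) (i : Int) (j : Int) : Int :=
  if i > j then 0
  else
    ((PySem.List.pyRange 1 (j - i + 2) 1).foldl (altRow arr i j) PySem.Dict.empty).getD (i, j) 0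

-- ===== PRECONDITION & SPEC =====
-- Pre_ is exactly where Python's A returns normally: either the empty interval (i > j),
-- or every index A touches (all lie in [i, j]) is a legal Python index, i.e. -len ≤ i and j < len;
-- outside it A raises IndexError.
def Pre_max_price (arr : List Int) (i : Int) (j : Int) : Prop :=
  i > j ∨ (-(arr.length : Int) ≤ i ∧ j < (arr.length : Int))
instance (arr : List Int) (i : Int) (j : Int) : Decidable (Pre_max_price arr i j) := by
  unfold Pre_max_price; infer_instance

def pvWitness_max_price : List Int × Int × Int := ([1, 2, 3, 4], 0, 3)

def Spec_max_price (arr : List Int) (i : Int) (j : Int) (out : Int) : Prop := out = max_price_alt arr i j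
instance (arr : List Int) (i : Int) (j : Int) (out : Int) : Decidable (Spec_max_price arr i j out) := by unfold Spec_max_price; infer_instance

-- ===== CLAIM (what is proved, stated in full; the proofs are below) =====
def Claim_equal_max_price : Prop := ∀ (arr : List Int) (i : Int) (j : Int), Dom_max_price arr i j → Pre_max_price arr i j → Spec_max_price arr i j (max_price arr i j)

-- ===== LEMMAS AND PROOFS =====

-- Every value stored in the table is the A-recursion's value for its interval.
def Sound (arr : List Int) (dp : PySem.Dict (Int × Int) Int) : Prop :=
  ∀ l r v, dp.get? (l, r) = some v → v = max_price arr l r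

-- All intervals inside [i, j] of length ≤ L are already in the table.
def Complete (_arr : List Int) (i j : Int) (dp : PySem.Dict (Int × Int) Int) (L : Int) : Prop :=
  ∀ l r, i ≤ l → r ≤ j → l ≤ r → r - l + 1 ≤ L → dp.contains (l, r) = true

theorem ite_gt_eq_max (a x : Int) : (if x > a then x else a) = max a x := by
  rcases lt_or_ge a x with h | h
  · rw [if_pos h, max_eq_right h.le]
  · rw [if_neg (not_lt.mpr h), max_eq_left h]

theorem getD_eq_max_price (arr : List Int) (i j L : Int) (dp : PySem.Dict (Int × Int) Int)
    (hs : Sound arr dp) (hc : Complete arr i j dp L) (l r : Int)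
    (h : r < l ∨ (i ≤ l ∧ r ≤ j ∧ l ≤ r ∧ r - l + 1 ≤ L)) :
    dp.getD (l, r) 0 = max_price arr l r := by
  cases h' : dp.get? (l, r) with
  | none =>
    rw [PySem.Dict.getD_of_get?_eq_none dp 0 h']
    rcases h with h | ⟨h1, h2, h3, h4⟩
    · rw [max_price, if_pos (by omega)]
    · have hcc := hc l r h1 h2 h3 h4
      rw [PySem.Dict.contains_eq_isSome_get?, h'] at hcc
      simp at hcc
  | some v =>
    rw [PySem.Dict.getD_of_get?_eq_some dp 0 h']
    exact hs l r v h' 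

theorem altBest_eq (arr : List Int) (i j l r : Int) (dp : PySem.Dict (Int × Int) Int)
    (hs : Sound arr dp) (hc : Complete arr i j dp (r - l))
    (hi : i ≤ l) (hj : r ≤ j) (hlr : l ≤ r) :
    altBest arr dp l r = max_price arr l r := by
  have hu : max_price arr l r =
      (PySem.List.pyRange l (r + 1) 1).foldl (fun maxa k =>
        max maxa (max_price arr l (k - 1) + max_price arr (k + 1) r +
          (if k = l ∧ k = r then PySem.List.pyGetD arr k 0
           else if k = l ∧ l + 1 ≤ r then PySem.List.pyGetD arr k 0 + PySem.List.pyGetD arr (k + 1) 0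
           else if k = r ∧ k - 1 ≥ l then PySem.List.pyGetD arr k 0 + PySem.List.pyGetD arr (k - 1) 0
           else if k > l ∧ k < r then PySem.List.pyGetD arr (k - 1) 0 + PySem.List.pyGetD arr k 0 + PySem.List.pyGetD arr (k + 1) 0
           else 0))) 0 := by
    rw [max_price, if_neg (by omega)]
    exact List.foldl_attach (l := PySem.List.pyRange l (r + 1) 1) (b := 0)
      (f := fun maxa k =>
        max maxa (max_price arr l (k - 1) + max_price arr (k + 1) r +
          (if k = l ∧ k = r then PySem.List.pyGetD arr k 0
           else if k = l ∧ l + 1 ≤ r then PySem.List.pyGetD arr k 0 + PySem.List.pyGetD arr (k + 1) 0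
           else if k = r ∧ k - 1 ≥ l then PySem.List.pyGetD arr k 0 + PySem.List.pyGetD arr (k - 1) 0
           else if k > l ∧ k < r then PySem.List.pyGetD arr (k - 1) 0 + PySem.List.pyGetD arr k 0 + PySem.List.pyGetD arr (k + 1) 0
           else 0)))
  rw [altBest, hu]
  apply PySem.List.foldl_congr_mem
  intro acc k hk
  have hm := PySem.List.mem_pyRange_one.mp hk
  have hL : dp.getD (l, k - 1) 0 = max_price arr l (k - 1) := by
    apply getD_eq_max_price arr i j (r - l) dp hs hc
    by_cases hkl : k = l
    · left; omega
    · right; exact ⟨hi, by omega, by omega, by omega⟩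
  have hR : dp.getD (k + 1, r) 0 = max_price arr (k + 1) r := by
    apply getD_eq_max_price arr i j (r - l) dp hs hc
    by_cases hkr : k = r
    · left; omega
    · right; exact ⟨by omega, hj, by omega, by omega⟩
  simp only [hL, hR, ite_gt_eq_max]
  congr 1
  split_ifs <;> omega

theorem altRow_inv (arr : List Int) (i j L : Int) (h1 : 1 ≤ L) :
    ∀ (n : Nat) (a : Int) (dp : PySem.Dict (Int × Int) Int),
      (j - L + 2 - a).toNat = n → i ≤ a → Sound arr dp → Complete arr i j dp (L - 1) →
      Sound arr ((PySem.List.pyRange a (j - L + 2) 1).foldl (fun dp l =>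
          dp.insert (l, l + L - 1) (altBest arr dp l (l + L - 1))) dp)
      ∧ (∀ p, dp.contains p = true →
          ((PySem.List.pyRange a (j - L + 2) 1).foldl (fun dp l =>
            dp.insert (l, l + L - 1) (altBest arr dp l (l + L - 1))) dp).contains p = true)
      ∧ (∀ l, a ≤ l → l < j - L + 2 →
          ((PySem.List.pyRange a (j - L + 2) 1).foldl (fun dp l =>
            dp.insert (l, l + L - 1) (altBest arr dp l (l + L - 1))) dp).contains (l, l + L - 1) = true) := by
  intro n
  induction n with
  | zero =>
    intro a dp hn ha hs hc
    rw [PySem.List.pyRange_one_eq_nil (by omega)]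
    simp only [List.foldl_nil]
    exact ⟨hs, fun p hp => hp, fun l hl1 hl2 => absurd hl2 (by omega)⟩
  | succ n ih =>
    intro a dp hn ha hs hc
    by_cases hab : a < j - L + 2
    · rw [PySem.List.pyRange_one_cons hab]
      simp only [List.foldl_cons]
      have hbesteq : altBest arr dp a (a + L - 1) = max_price arr a (a + L - 1) := by
        apply altBest_eq arr i j a (a + L - 1) dp hs ?_ ha (by omega) (by omega)
        have h2 : a + L - 1 - a = L - 1 := by ring
        rw [h2]; exact hc
      have hs1 : Sound arr (dp.insert (a, a + L - 1) (altBest arr dp a (a + L - 1))) := by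
        intro l r v hget
        rw [PySem.Dict.get?_insert] at hget
        split at hget
        · next heq =>
            obtain ⟨rfl, rfl⟩ := Prod.mk.injEq .. ▸ heq
            injection hget with hv
            rw [← hv, hbesteq]
        · next => exact hs l r v hget
      have hc1 : Complete arr i j (dp.insert (a, a + L - 1) (altBest arr dp a (a + L - 1))) (L - 1) := by
        intro l r hx1 hx2 hx3 hx4
        rw [PySem.Dict.contains_insert]
        rw [hc l r hx1 hx2 hx3 hx4]
        simp
      obtain ⟨S, M, N⟩ := ih (a + 1) _ (by omega) (by omega) hs1 hc1
      refine ⟨S, ?_, ?_⟩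
      · intro p hp
        apply M
        rw [PySem.Dict.contains_insert, hp]
        simp
      · intro l hl1 hl2
        rcases eq_or_lt_of_le hl1 with rfl | hlt
        · apply M
          rw [PySem.Dict.contains_insert]
          simp
        · exact N l (by omega) hl2
    · rw [PySem.List.pyRange_one_eq_nil (by omega)]
      simp only [List.foldl_nil]
      exact ⟨hs, fun p hp => hp, fun l hl1 hl2 => absurd hl2 (by omega)⟩

theorem outer_inv (arr : List Int) (i j : Int) (_hij : i ≤ j) :
    ∀ (n : Nat) (a : Int) (dp : PySem.Dict (Int × Int) Int),
      (j - i + 2 - a).toNat = n → 1 ≤ a → Sound arr dp → Complete arr i j dp (a - 1) →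
      Sound arr ((PySem.List.pyRange a (j - i + 2) 1).foldl (altRow arr i j) dp)
      ∧ Complete arr i j ((PySem.List.pyRange a (j - i + 2) 1).foldl (altRow arr i j) dp) (j - i + 1) := by
  intro n
  induction n with
  | zero =>
    intro a dp hn ha hs hc
    rw [PySem.List.pyRange_one_eq_nil (by omega)]
    simp only [List.foldl_nil]
    exact ⟨hs, fun l r h1 h2 h3 h4 => hc l r h1 h2 h3 (by omega)⟩
  | succ n ih =>
    intro a dp hn ha hs hc
    by_cases hab : a < j - i + 2
    · rw [PySem.List.pyRange_one_cons hab]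
      simp only [List.foldl_cons]
      obtain ⟨S1, M1, N1⟩ := altRow_inv arr i j a ha ((j - a + 2 - i).toNat) i dp rfl le_rfl hs hc
      have hrow : altRow arr i j dp a = (PySem.List.pyRange i (j - a + 2) 1).foldl (fun dp l =>
          dp.insert (l, l + a - 1) (altBest arr dp l (l + a - 1))) dp := rfl
      have hc1 : Complete arr i j (altRow arr i j dp a) (a + 1 - 1) := by
        intro l r h1 h2 h3 h4
        by_cases hla : r - l + 1 ≤ a - 1
        · rw [hrow]
          exact M1 _ (hc l r h1 h2 h3 hla)
        · have hr : r = l + a - 1 := by omega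
          subst hr
          rw [hrow]
          exact N1 l h1 (by omega)
      have hs1 : Sound arr (altRow arr i j dp a) := by rw [hrow]; exact S1
      exact ih (a + 1) (altRow arr i j dp a) (by omega) (by omega) hs1 hc1
    · rw [PySem.List.pyRange_one_eq_nil (by omega)]
      simp only [List.foldl_nil]
      exact ⟨hs, fun l r h1 h2 h3 h4 => hc l r h1 h2 h3 (by omega)⟩

-- ===== VERDICT (by name: the statement is the Claim_ definition above) =====
theorem max_price_spec : Claim_equal_max_price := by
  unfold Claim_equal_max_price
  intro arr i j _ hpre
  unfold Spec_max_price
  by_cases hij : i > j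
  · rw [max_price, if_pos hij, max_price_alt, if_pos hij]
  · replace hij : i ≤ j := by omega
    rw [max_price_alt, if_neg (by omega)]
    obtain ⟨S, C⟩ := outer_inv arr i j hij ((j - i + 2 - 1).toNat) 1 PySem.Dict.empty rfl le_rfl
      (fun l r v h => by rw [PySem.Dict.get?_empty] at h; exact absurd h (by simp))
      (fun l r h1 h2 h3 h4 => absurd h4 (by omega))
    have hcon := C i j le_rfl le_rfl hij (by omega)
    rw [PySem.Dict.contains_eq_isSome_get?] at hcon
    cases hget : ((PySem.List.pyRange 1 (j - i + 2) 1).foldl (altRow arr i j) PySem.Dict.empty).get? (i, j) with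
    | none => rw [hget] at hcon; simp at hcon
    | some v =>
      rw [PySem.Dict.getD_of_get?_eq_some _ 0 hget]
      exact (S i j v hget).symm
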